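-- pv_equiv track=rewrite | github.com/crdanielbusch/primap-vis-tool | src/primap_visualisation_tool_stateless_app/dataset_handling.py | sort_entity_options
-- ===== SOURCE A (Python) =====
-- def sort_entity_options(
--     entity_options: list[str] | tuple[str],
--     preferred_order: tuple[str, ...] = (
--         "KYOTOGHG",
--         "CO2",
--         "CH4",
--         "N2O",
--         "FGASES",
--         "HFCS",
--         "PFCS",
--         "SF6",
--         "NF3",
--     ),
-- ) -> list[str]:
--     """
--     Sort entity options
--
--     Parameters
--     ----------
--     entity_options
--         Entity options to sort
--
--     preferred_order
--         The preferred order of the entities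
--
--     Returns
--     -------
--         Sorted entity options
--     """
--
--     def sort_key(item: str) -> int:
--         for index, preferred in enumerate(preferred_order):
--             if preferred in item:
--                 return index
--         return len(preferred_order)
--
--     return sorted(entity_options, key=sort_key)
-- ===== SOURCE B (Python) =====
-- def sort_entity_options(
--     entity_options,
--     preferred_order=(
--         "KYOTOGHG",
--         "CO2",
--         "CH4",
--         "N2O",
--         "FGASES",
--         "HFCS",
--         "PFCS",
--         "SF6",
--         "NF3",
--     ),
-- ):
--     n = len(preferred_order)
--     buckets = [[] for _ in range(n + 1)]
--     for item in entity_options: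
--         for k, p in enumerate(preferred_order):
--             if p in item:
--                 buckets[k].append(item)
--                 break
--         else:
--             buckets[n].append(item)
--     result = []
--     for b in buckets:
--         result.extend(b)
--     return result
-- ===== Notes on version B (the rewrite author's own statement) =====
-- stated objective: alternative
-- what changed: Replaces the comparison sort keyed by substring rank with a one-pass stable bucket sort: each item is appended to the bucket of its first matching preferred substring (or the trailing no-match bucket) and the buckets are concatenated in index order.
import Mathlib
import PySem

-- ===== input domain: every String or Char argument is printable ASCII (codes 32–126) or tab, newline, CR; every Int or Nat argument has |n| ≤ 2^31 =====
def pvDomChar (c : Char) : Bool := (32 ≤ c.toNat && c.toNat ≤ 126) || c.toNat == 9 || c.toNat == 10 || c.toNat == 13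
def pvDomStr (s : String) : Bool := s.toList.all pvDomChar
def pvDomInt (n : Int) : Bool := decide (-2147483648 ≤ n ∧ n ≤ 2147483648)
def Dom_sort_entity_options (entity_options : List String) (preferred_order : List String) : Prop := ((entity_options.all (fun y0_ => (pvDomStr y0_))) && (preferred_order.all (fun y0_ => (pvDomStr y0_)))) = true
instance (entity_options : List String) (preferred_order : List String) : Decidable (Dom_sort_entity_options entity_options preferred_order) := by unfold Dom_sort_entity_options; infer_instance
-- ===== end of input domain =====

-- B replaces A's comparison sort (sorted with a substring-rank key) by a one-pass stable
-- bucket sort: each item is appended to the bucket of its key and the buckets are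
-- concatenated in index order.


-- ===== PORT A =====
-- A's inner `sort_key`: scan enumerate(preferred_order); return the index of the first
-- preferred substring contained in item, else len(preferred_order).
def pvSortKeyGoA (item : String) : List (Int × String) → Int → Int
  | [], n => n
  | (index, preferred) :: rest, n =>
      if PySem.Str.isIn preferred item then index else pvSortKeyGoA item rest n

def pvSortKeyA (preferred_order : List String) (item : String) : Int :=
  pvSortKeyGoA item (PySem.List.enumerate preferred_order 0) (preferred_order.length : Int)

def sort_entity_options (entity_options : List String) (preferred_order : List String) : List String :=
  PySem.List.sorted entity_options (pvSortKeyA preferred_order)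

-- ===== PORT B =====
-- B's inner loop: k starts at 0 and is incremented until the first preferred substring match (break).
def pvKeyGoB (item : String) (i : Nat) : List String → Nat
  | [] => i
  | p :: ps => if PySem.Str.isIn p item then i else pvKeyGoB item (i + 1) ps

-- buckets[k].append(item)
def pvAppendAt : Nat → List (List String) → String → List (List String)
  | _, [], _ => []
  | 0, b :: bs, x => (b ++ [x]) :: bs
  | k + 1, b :: bs, x => b :: pvAppendAt k bs x

def sort_entity_options_alt (entity_options : List String) (preferred_order : List String) : List String :=
  let n := preferred_order.length
  let buckets0 : List (List String) := (List.range (n + 1)).map (fun _ => [])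
  let buckets := entity_options.foldl
    (fun bs item => pvAppendAt (pvKeyGoB item 0 preferred_order) bs item) buckets0
  buckets.foldl (fun acc b => acc ++ b) []

-- ===== PRECONDITION & SPEC =====
def Spec_sort_entity_options (entity_options : List String) (preferred_order : List String) (out : List String) : Prop := out = sort_entity_options_alt entity_options preferred_order
instance (entity_options : List String) (preferred_order : List String) (out : List String) : Decidable (Spec_sort_entity_options entity_options preferred_order out) := by unfold Spec_sort_entity_options; infer_instance

-- ===== CLAIM (what is proved, stated in full; the proofs are below) =====
def Claim_equal_sort_entity_options : Prop := ∀ (entity_options : List String) (preferred_order : List String), Dom_sort_entity_options entity_options preferred_order → Spec_sort_entity_options entity_options preferred_order (sort_entity_options entity_options preferred_order)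

-- ===== LEMMAS AND PROOFS =====

-- A's key equals B's key (cast to Int).
theorem pvKey_eq (item : String) : ∀ (ps : List String) (i : Nat),
    pvSortKeyGoA item (PySem.List.enumerate ps (i : Int)) ((i : Int) + (ps.length : Int))
      = ((pvKeyGoB item i ps : Nat) : Int) := by
  intro ps
  induction ps with
  | nil => intro i; simp [pvSortKeyGoA, pvKeyGoB, PySem.List.enumerate]
  | cons p ps ih =>
      intro i
      rw [PySem.List.enumerate_cons]
      by_cases hc : PySem.Chars.isIn p.toList item.toList
      · simp [pvSortKeyGoA, pvKeyGoB, hc]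
      · have h1 := ih (i + 1)
        push_cast at h1
        simp only [pvSortKeyGoA, pvKeyGoB, PySem.Str.isIn_eq, hc, Bool.false_eq_true,
          if_false, List.length_cons]
        push_cast
        rw [show (i : Int) + ((ps.length : Int) + 1) = ((i : Int) + 1) + (ps.length : Int) by ring]
        exact h1

theorem pvSortKeyA_eq (po : List String) (item : String) :
    pvSortKeyA po item = ((pvKeyGoB item 0 po : Nat) : Int) := by
  have h := pvKey_eq item po 0
  simpa [pvSortKeyA] using h

-- B's key is bounded by start + remaining length.
theorem pvKeyGoB_le (item : String) : ∀ (ps : List String) (i : Nat),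
    pvKeyGoB item i ps ≤ i + ps.length := by
  intro ps
  induction ps with
  | nil => intro i; simp [pvKeyGoB]
  | cons p ps ih =>
      intro i
      by_cases hc : PySem.Chars.isIn p.toList item.toList
      · simp [pvKeyGoB, hc]
      · simp only [pvKeyGoB, PySem.Str.isIn_eq, hc, Bool.false_eq_true, if_false,
          List.length_cons]
        have h1 := ih (i + 1); omega

-- The bucket of xs for key value k, and the concatenation of all buckets.
def pvBucket (po : List String) (xs : List String) (k : Nat) : List String :=
  xs.filter (fun x => pvKeyGoB x 0 po == k)

def pvTarget (po : List String) (xs : List String) : List String :=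
  ((List.range (po.length + 1)).map (pvBucket po xs)).flatten

theorem pvBucket_append (po : List String) (xs : List String) (x : String) (k : Nat) :
    pvBucket po (xs ++ [x]) k
      = pvBucket po xs k ++ (if pvKeyGoB x 0 po = k then [x] else []) := by
  simp only [pvBucket, List.filter_append, List.filter_cons, List.filter_nil]
  by_cases h : pvKeyGoB x 0 po = k <;> simp [h]

-- pvAppendAt is set-at-index with an appended element.
theorem pvAppendAt_eq_set : ∀ (j : Nat) (bs : List (List String)) (x : String), j < bs.length →
    pvAppendAt j bs x = bs.set j (bs.getD j [] ++ [x]) := by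
  intro j
  induction j with
  | zero =>
      intro bs x h
      cases bs with
      | nil => simp at h
      | cons b bs => simp [pvAppendAt]
  | succ j ih =>
      intro bs x h
      cases bs with
      | nil => simp at h
      | cons b bs =>
          simp only [pvAppendAt, List.set, List.getD, List.getElem?_cons_succ]
          rw [ih bs x (by simpa using h)]
          rfl

-- Appending at bucket j of a range-indexed bucket list.
theorem pvAppendAt_map_range (x : String) (m : Nat) (g : Nat → List String) (j : Nat)
    (h : j < m) :
    pvAppendAt j ((List.range m).map g) x
      = (List.range m).map (fun k => if k = j then g k ++ [x] else g k) := by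
  rw [pvAppendAt_eq_set j _ x (by simpa using h)]
  apply List.ext_getElem
  · simp
  · intro i h1 h2
    simp only [List.getElem_set, List.getElem_map, List.getElem_range] at *
    by_cases hij : i = j
    · subst hij
      simp [List.getD, h]
    · have hji : ¬ j = i := fun hh => hij hh.symm
      simp [hij, hji]

-- Membership in a bucket forces the key value.
theorem mem_pvBucket (po : List String) (xs : List String) (k : Nat) (y : String)
    (h : y ∈ pvBucket po xs k) : pvKeyGoB y 0 po = k := by
  simp only [pvBucket, List.mem_filter, beq_iff_eq] at h
  exact h.2

-- Stable insertion into a key-partitioned concatenation.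
theorem insertBy_middle (key : String → Nat) (x : String) :
    ∀ (L1 L2 : List String),
      (∀ y ∈ L1, ¬ key x < key y) → (∀ y ∈ L2, key x < key y) →
      PySem.List.insertBy (fun a b => decide (key a < key b)) x (L1 ++ L2) = L1 ++ x :: L2 := by
  intro L1
  induction L1 with
  | nil =>
      intro L2 _ h2
      cases L2 with
      | nil => simp [PySem.List.insertBy]
      | cons y ys =>
          have h := h2 y (by simp)
          simp [PySem.List.insertBy, h]
  | cons z L1 ih =>
      intro L2 h1 h2
      have hz : ¬ key x < key z := h1 z (by simp)
      simp only [List.cons_append, PySem.List.insertBy, decide_eq_true_eq, if_neg hz]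
      rw [ih L2 (fun y hy => h1 y (by simp [hy])) h2]

-- B-side: the bucket-filling fold produces exactly the range-indexed buckets of xs.
theorem pv_bside (po : List String) (xs : List String) :
    xs.foldl (fun bs item => pvAppendAt (pvKeyGoB item 0 po) bs item)
      ((List.range (po.length + 1)).map (fun _ => []))
      = (List.range (po.length + 1)).map (pvBucket po xs) := by
  induction xs using List.reverseRecOn with
  | nil =>
      symm
      apply List.map_congr_left
      intro k _
      simp [pvBucket]
  | append_singleton xs x ih =>
      rw [List.foldl_append, List.foldl_cons, List.foldl_nil, ih]
      have hj : pvKeyGoB x 0 po < po.length + 1 := by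
        have h := pvKeyGoB_le x po 0; omega
      rw [pvAppendAt_map_range x (po.length + 1) (pvBucket po xs) (pvKeyGoB x 0 po) hj]
      apply List.map_congr_left
      intro k _
      rw [pvBucket_append]
      by_cases h : pvKeyGoB x 0 po = k
      · simp [h]
      · have h2 : ¬ k = pvKeyGoB x 0 po := fun hh => h hh.symm
        simp [h, h2]

-- A-side: insertion sort with the rank key also produces the concatenated buckets.
theorem pv_aside (po : List String) (xs : List String) :
    PySem.List.sorted xs (pvSortKeyA po) = pvTarget po xs := by
  rw [PySem.List.sorted_eq_foldl_insertBy]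
  have hbef : (fun a b => decide (pvSortKeyA po a < pvSortKeyA po b))
      = (fun a b => decide (pvKeyGoB a 0 po < pvKeyGoB b 0 po)) := by
    funext a b
    rw [pvSortKeyA_eq, pvSortKeyA_eq]
    simp
  rw [hbef]
  induction xs using List.reverseRecOn with
  | nil =>
      simp only [List.foldl_nil, pvTarget]
      symm
      rw [List.flatten_eq_nil_iff]
      intro l hl
      simp only [List.mem_map] at hl
      obtain ⟨k, -, hk⟩ := hl
      simp [← hk, pvBucket]
  | append_singleton xs x ih =>
      rw [List.foldl_append, List.foldl_cons, List.foldl_nil, ih]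
      -- split the range at j+1 where j = key of x
      have hj : pvKeyGoB x 0 po ≤ po.length := by
        have h := pvKeyGoB_le x po 0; omega
      set j := pvKeyGoB x 0 po with hjdef
      have hsplit : po.length + 1 = (j + 1) + (po.length - j) := by omega
      have hr : List.range (po.length + 1)
          = List.range (j + 1) ++ (List.range (po.length - j)).map (fun t => (j + 1) + t) := by
        rw [hsplit, List.range_add]
      have key_lt (k : Nat) (y : String) (hy : y ∈ pvBucket po xs k) :
          pvKeyGoB y 0 po = k := mem_pvBucket po xs k y hy
      -- the two halves
      have hmid := insertBy_middle (fun s => pvKeyGoB s 0 po) x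
        (((List.range (j + 1)).map (pvBucket po xs)).flatten)
        ((((List.range (po.length - j)).map (fun t => (j + 1) + t)).map (pvBucket po xs)).flatten)
        (by
          intro y hy
          simp only [List.mem_flatten, List.mem_map] at hy
          obtain ⟨l, ⟨k, hk, hl⟩, hyl⟩ := hy
          subst hl
          have hky := key_lt k y hyl
          simp only [List.mem_range] at hk
          change ¬ pvKeyGoB x 0 po < pvKeyGoB y 0 po
          omega)
        (by
          intro y hy
          simp only [List.mem_flatten, List.mem_map] at hy
          obtain ⟨l, ⟨k, ⟨t, ht, hk⟩, hl⟩, hyl⟩ := hy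
          subst hl
          have hky := key_lt k y hyl
          simp only [List.mem_range] at ht
          change pvKeyGoB x 0 po < pvKeyGoB y 0 po
          omega)
      rw [pvTarget, hr, List.map_append, List.flatten_append, hmid]
      -- now compute pvTarget of xs ++ [x]
      rw [pvTarget, hr, List.map_append, List.flatten_append]
      -- suffix buckets are unchanged
      have hsuf : (((List.range (po.length - j)).map (fun t => (j + 1) + t)).map
            (pvBucket po (xs ++ [x]))).flatten
          = (((List.range (po.length - j)).map (fun t => (j + 1) + t)).map
            (pvBucket po xs)).flatten := by
        congr 1
        apply List.map_congr_left
        intro k hk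
        simp only [List.mem_map] at hk
        obtain ⟨t, -, hkt⟩ := hk
        rw [pvBucket_append]
        have h2 : ¬ pvKeyGoB x 0 po = k := by omega
        simp [h2]
      rw [hsuf]
      -- prefix: range (j+1) = range j ++ [j]
      have hpre : ((List.range (j + 1)).map (pvBucket po (xs ++ [x]))).flatten
          = ((List.range (j + 1)).map (pvBucket po xs)).flatten ++ [x] := by
        rw [List.range_succ, List.map_append, List.map_append,
            List.flatten_append, List.flatten_append]
        have hlow : (List.range j).map (pvBucket po (xs ++ [x]))
            = (List.range j).map (pvBucket po xs) := by
          apply List.map_congr_left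
          intro k hk
          simp only [List.mem_range] at hk
          rw [pvBucket_append]
          have h2 : ¬ pvKeyGoB x 0 po = k := by omega
          simp [h2]
        rw [hlow]
        have h3 : pvKeyGoB x 0 po = j := hjdef.symm
        simp [pvBucket_append, h3]
      rw [hpre]
      simp

-- ===== VERDICT (by name: the statement is the Claim_ definition above) =====
theorem sort_entity_options_spec : Claim_equal_sort_entity_options := by
  intro eo po _
  unfold Spec_sort_entity_options sort_entity_options sort_entity_options_alt
  rw [pv_aside po eo]
  simp only []
  rw [pv_bside po]
  rw [PySem.List.foldl_append_eq_flatMap (fun b => b)]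
  simp [pvTarget, List.flatMap_id']
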